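-- pv_equiv track=rewrite | github.com/forchain/food_delivery_dispatcher | food_delivery_dispatcher/dispatcher.py | assign_drivers_to_orders
-- ===== SOURCE A (Python) =====
-- def assign_drivers_to_orders(distance_table, batch_size):
--     """
--     Assign drivers to orders in batches
--
--     Args:
--         distance_table: List of (driver_id, order_id, distance) tuples
--         batch_size: Maximum size of each batch
--
--     Yields:
--         List of (order_id, driver_id) assignments for each batch
--     """
--     assigned_drivers = set()
--     assigned_orders = set()
--     assignments = []
--     current_size = 0
--
--     for driver_id, order_id, distance in distance_table:
--         if driver_id not in assigned_drivers and order_id not in assigned_orders: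
--             assignments.append((order_id, driver_id))
--             assigned_drivers.add(driver_id)
--             assigned_orders.add(order_id)
--             current_size += 1
--
--             # Yield assignments when batch size is reached
--             if current_size >= batch_size:
--                 yield assignments
--                 assignments = []
--                 current_size = 0
--
--     # Yield remaining assignments if any
--     if assignments:
--         yield assignments
-- ===== SOURCE B (Python) =====
-- def assign_drivers_to_orders(distance_table, batch_size):
--     # Pass 1: greedy filtering (no batching logic mixed in).
--     assigned_drivers = set()
--     assigned_orders = set()
--     result = []
--     for driver_id, order_id, _ in distance_table:
--         if driver_id not in assigned_drivers and order_id not in assigned_orders: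
--             result.append((order_id, driver_id))
--             assigned_drivers.add(driver_id)
--             assigned_orders.add(order_id)
--     # Pass 2: chunk into batches of step = max(batch_size, 1).
--     step = max(batch_size, 1)
--     while result:
--         yield result[:step]
--         result = result[step:]
-- ===== Notes on version B (the rewrite author's own statement) =====
-- stated objective: simpler
-- what changed: B separates the greedy driver/order filtering (one plain pass building a flat assignment list) from the batching, which becomes a simple step-sized chunking of that list with step = max(batch_size, 1), instead of A's interleaved buffer-and-counter flushing inside the loop.
import Mathlib
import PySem

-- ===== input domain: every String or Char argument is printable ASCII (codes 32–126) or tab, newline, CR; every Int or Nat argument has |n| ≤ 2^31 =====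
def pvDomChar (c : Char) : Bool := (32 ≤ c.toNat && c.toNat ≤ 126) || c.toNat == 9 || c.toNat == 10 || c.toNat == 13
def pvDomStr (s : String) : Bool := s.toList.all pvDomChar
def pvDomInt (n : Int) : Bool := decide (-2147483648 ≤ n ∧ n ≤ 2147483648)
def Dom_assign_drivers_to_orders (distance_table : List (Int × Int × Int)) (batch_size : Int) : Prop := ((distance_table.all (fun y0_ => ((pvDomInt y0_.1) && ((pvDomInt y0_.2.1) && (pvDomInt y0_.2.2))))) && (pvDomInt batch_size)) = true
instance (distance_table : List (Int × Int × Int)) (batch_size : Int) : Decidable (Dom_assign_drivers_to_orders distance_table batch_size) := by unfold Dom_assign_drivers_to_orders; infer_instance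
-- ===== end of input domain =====

-- B separates the greedy filtering pass from batching (plain list chunking); same return value as A.
-- ===== PORT A =====
-- A's generator loop: state = (assigned_drivers, assigned_orders, assignments buffer, current_size, yielded batches)
def adoLoopA (bs : Int) (dt : List (Int × Int × Int)) (ds os : PySem.Set Int)
    (buf : List (Int × Int)) (cur : Int) (out : List (List (Int × Int))) : List (List (Int × Int)) :=
  match dt with
  | [] => if buf ≠ [] then out ++ [buf] else out          -- "if assignments: yield assignments"
  | (driver_id, order_id, _) :: rest =>
    if ¬ PySem.Set.contains ds driver_id ∧ ¬ PySem.Set.contains os order_id then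
      let buf' := buf ++ [(order_id, driver_id)]
      let cur' := cur + 1
      if cur' ≥ bs then
        adoLoopA bs rest (PySem.Set.add ds driver_id) (PySem.Set.add os order_id) [] 0 (out ++ [buf'])
      else
        adoLoopA bs rest (PySem.Set.add ds driver_id) (PySem.Set.add os order_id) buf' cur' out
    else adoLoopA bs rest ds os buf cur out

def assign_drivers_to_orders (distance_table : List (Int × Int × Int)) (batch_size : Int) : List (List (Int × Int)) :=
  adoLoopA batch_size distance_table PySem.Set.empty PySem.Set.empty [] 0 []

-- ===== PORT B =====
-- B's pass 1: greedy filtering, building the flat result list.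
def greedyB (dt : List (Int × Int × Int)) (ds os : PySem.Set Int) : List (Int × Int) :=
  match dt with
  | [] => []
  | (driver_id, order_id, _) :: rest =>
    if ¬ PySem.Set.contains ds driver_id ∧ ¬ PySem.Set.contains os order_id then
      (order_id, driver_id) :: greedyB rest (PySem.Set.add ds driver_id) (PySem.Set.add os order_id)
    else greedyB rest ds os

-- B's pass 2: "while result: yield result[:step]; result = result[step:]" with step = step1 + 1 ≥ 1
-- (structural recursion: result[:step] = x :: xs.take step1, result[step:] = xs.drop step1 — exact since step ≥ 1).
def chunkB (step1 : Nat) : List (Int × Int) → List (List (Int × Int))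
  | [] => []
  | x :: xs => (x :: xs.take step1) :: chunkB step1 (xs.drop step1)
termination_by l => l.length
decreasing_by simp

def assign_drivers_to_orders_alt (distance_table : List (Int × Int × Int)) (batch_size : Int) : List (List (Int × Int)) :=
  chunkB (max batch_size 1 - 1).toNat (greedyB distance_table PySem.Set.empty PySem.Set.empty)

-- ===== PRECONDITION & SPEC =====
def Spec_assign_drivers_to_orders (distance_table : List (Int × Int × Int)) (batch_size : Int) (out : List (List (Int × Int))) : Prop := out = assign_drivers_to_orders_alt distance_table batch_size
instance (distance_table : List (Int × Int × Int)) (batch_size : Int) (out : List (List (Int × Int))) : Decidable (Spec_assign_drivers_to_orders distance_table batch_size out) := by unfold Spec_assign_drivers_to_orders; infer_instance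

-- ===== CLAIM =====
def Claim_equal_assign_drivers_to_orders : Prop := ∀ (distance_table : List (Int × Int × Int)) (batch_size : Int), Dom_assign_drivers_to_orders distance_table batch_size → Spec_assign_drivers_to_orders distance_table batch_size (assign_drivers_to_orders distance_table batch_size)

-- ===== LEMMAS AND PROOFS =====
@[simp] lemma chunkB_nil (step1 : Nat) : chunkB step1 [] = [] := by rw [chunkB.eq_def]

lemma chunkB_cons (step1 : Nat) (x : Int × Int) (xs : List (Int × Int)) :
    chunkB step1 (x :: xs) = (x :: xs.take step1) :: chunkB step1 (xs.drop step1) := by rw [chunkB.eq_def]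

-- chunkB splits off an exact-length prefix.
lemma chunkB_exact (step1 : Nat) (l r : List (Int × Int)) (h : l.length = step1 + 1) :
    chunkB step1 (l ++ r) = l :: chunkB step1 r := by
  cases l with
  | nil => simp at h
  | cons x xs =>
    simp only [List.length_cons, Nat.add_right_cancel_iff] at h
    subst h
    simp [List.cons_append, chunkB_cons]

-- a short list is one chunk (or none).
lemma chunkB_short (step1 : Nat) (l : List (Int × Int)) (h : l.length ≤ step1 + 1) (hne : l ≠ []) :
    chunkB step1 l = [l] := by
  cases l with
  | nil => exact absurd rfl hne
  | cons x xs =>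
    simp only [List.length_cons] at h
    simp [chunkB_cons, List.take_of_length_le (by omega : xs.length ≤ step1),
      List.drop_eq_nil_of_le (by omega : xs.length ≤ step1)]

-- Main invariant: A's interleaved loop equals "out ++ chunks of (buffer ++ remaining greedy picks)".
lemma adoLoopA_eq (bs : Int) (step1 : Nat) (hstep : step1 = (max bs 1 - 1).toNat) :
    ∀ (dt : List (Int × Int × Int)) (ds os : PySem.Set Int) (buf : List (Int × Int))
      (out : List (List (Int × Int))), buf.length ≤ step1 →
      adoLoopA bs dt ds os buf (buf.length : Int) out = out ++ chunkB step1 (buf ++ greedyB dt ds os) := by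
  intro dt
  induction dt with
  | nil =>
    intro ds os buf out hle
    by_cases hb : buf = []
    · simp [adoLoopA, greedyB, hb]
    · simp [adoLoopA, greedyB, hb, chunkB_short step1 buf (by omega) hb]
  | cons t rest ih =>
    intro ds os buf out hle
    obtain ⟨d, o, dist⟩ := t
    by_cases hc : ¬ PySem.Set.contains ds d ∧ ¬ PySem.Set.contains os o
    · by_cases hfl : (buf.length : Int) + 1 ≥ bs
      · have hlen : buf.length = step1 := by omega
        have := ih (PySem.Set.add ds d) (PySem.Set.add os o) [] (out ++ [buf ++ [(o, d)]])
          (by simp)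
        simp only [List.length_nil, Int.natCast_zero, List.nil_append] at this
        simp only [adoLoopA, if_pos hfl, this, greedyB, if_pos hc]
        rw [show buf ++ (o, d) :: greedyB rest (PySem.Set.add ds d) (PySem.Set.add os o)
              = (buf ++ [(o, d)]) ++ greedyB rest (PySem.Set.add ds d) (PySem.Set.add os o) by simp,
            chunkB_exact step1 _ _ (by simp [hlen])]
        simp
      · have hle' : (buf ++ [(o, d)]).length ≤ step1 := by
          simp only [List.length_append, List.length_cons, List.length_nil]
          omega
        have := ih (PySem.Set.add ds d) (PySem.Set.add os o) (buf ++ [(o, d)]) out hle'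
        simp only [List.length_append, List.length_cons, List.length_nil] at this ⊢
        simp only [adoLoopA, if_neg hfl, greedyB, if_pos hc]
        rw [show ((buf.length : Int) + 1) = (((buf.length + 1 : Nat)) : Int) by push_cast; ring]
        rw [this]
        simp
    · have := ih ds os buf out hle
      simp only [adoLoopA, greedyB, if_neg hc, this]

-- ===== VERDICT =====
theorem assign_drivers_to_orders_spec : Claim_equal_assign_drivers_to_orders := by
  intro dt bs _
  unfold Spec_assign_drivers_to_orders assign_drivers_to_orders assign_drivers_to_orders_alt
  have := adoLoopA_eq bs (max bs 1 - 1).toNat rfl dt PySem.Set.empty PySem.Set.empty [] [] (by simp)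
  simpa using this
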